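-- pv_equiv track=rewrite | github.com/cliffpham/algos_dataStructures | algos/2d_arr/max_skyline.py | solve
-- ===== SOURCE A (Python) =====
-- def find_max_cols(grid, heights):
--     for i in range(len(grid)):
--         result = []
--         for j in range(len(grid[i])):
--             result.append(grid[j][i])
--         heights[i] = max(result)
--
-- def create_table(grid):
--     heights = dict()
--     find_max_cols(grid, heights)
--     return heights
--
-- def solve(grid):
--     heights = create_table(grid)
--     total_change = 0
--
--     for i in range(len(grid[0])):
--         cur_max = max(grid[i])
--         for j in range(len(grid)):
--             cur = grid[i][j]
--             cur_min = min(heights[j], cur_max)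
--             if cur < cur_min:
--                 total_change += cur_min - cur
--     return total_change
-- ===== SOURCE B (Python) =====
-- def solve(grid):
--     colmax = sorted(max(col) for col in zip(*grid, strict=True))
--     total = 0
--     for row in grid:
--         r = max(row)
--         # binary search: lo ends as the number of column maxima <= r
--         lo, hi = 0, len(colmax)
--         while lo < hi:
--             mid = (lo + hi) // 2
--             if colmax[mid] <= r:
--                 lo = mid + 1
--             else:
--                 hi = mid
--         total += sum(colmax[:lo]) + r * (len(colmax) - lo) - sum(row)
--     return total
-- ===== Notes on version B (the rewrite author's own statement) =====
-- stated objective: alternative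
-- what changed: B replaces A's dict of column maxima and the per-cell min/guard double loop by transposing with zip(*grid, strict=True), sorting the column maxima once and, for each row, binary-searching (hand-written loop) how many column maxima are <= the row maximum r, adding their slice sum plus r times the remaining count and subtracting the row's total.
import Mathlib
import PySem

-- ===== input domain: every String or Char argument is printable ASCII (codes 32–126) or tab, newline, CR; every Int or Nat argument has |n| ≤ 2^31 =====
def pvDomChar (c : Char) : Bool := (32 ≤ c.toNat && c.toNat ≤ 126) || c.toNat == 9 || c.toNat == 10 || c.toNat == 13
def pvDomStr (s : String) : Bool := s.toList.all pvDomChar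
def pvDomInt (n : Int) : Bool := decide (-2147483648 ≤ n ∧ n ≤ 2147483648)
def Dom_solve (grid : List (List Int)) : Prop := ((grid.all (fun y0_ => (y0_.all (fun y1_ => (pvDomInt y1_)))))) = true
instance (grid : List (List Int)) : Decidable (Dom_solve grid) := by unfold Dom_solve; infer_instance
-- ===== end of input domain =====

-- B replaces A's dict of column maxima and the per-cell min/guard double loop by sorting the
-- column maxima once and, per row, binary-searching how many of them are ≤ the row maximum,
-- summing a slice plus a product and subtracting the row total (objective: alternative).

-- ===== PORT A =====
def findMaxCols (grid : List (List Int)) (heights : PySem.Dict Int Int) : PySem.Dict Int Int :=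
  (PySem.List.pyRange 0 (grid.length : Int) 1).foldl (fun h i =>
    let result := (PySem.List.pyRange 0 ((PySem.List.pyGetD grid i []).length : Int) 1).foldl
      (fun r j => r ++ [PySem.List.pyGetD (PySem.List.pyGetD grid j []) i 0]) []
    h.insert i ((PySem.List.max? result (fun x => x)).getD 0)) heights

def createTable (grid : List (List Int)) : PySem.Dict Int Int :=
  findMaxCols grid PySem.Dict.empty

def solve (grid : List (List Int)) : Int :=
  let heights := createTable grid
  (PySem.List.pyRange 0 ((PySem.List.pyGetD grid 0 []).length : Int) 1).foldl (fun tot i =>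
    let curMax := (PySem.List.max? (PySem.List.pyGetD grid i []) (fun x => x)).getD 0
    (PySem.List.pyRange 0 (grid.length : Int) 1).foldl (fun tot j =>
      let cur := PySem.List.pyGetD (PySem.List.pyGetD grid i []) j 0
      let curMin := min (heights.getD j 0) curMax
      if cur < curMin then tot + (curMin - cur) else tot) tot) 0

-- ===== PORT B =====
-- the hand-written 'while lo < hi' binary-search loop of Source B, step for step
def bisearch (cs : List Int) (r : Int) (lo hi : Int) : Int :=
  if h : lo < hi then
    let mid := PySem.Int.floordiv (lo + hi) 2
    if PySem.List.pyGetD cs mid 0 ≤ r then bisearch cs r (mid + 1) hi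
    else bisearch cs r lo mid
  else lo
termination_by (hi - lo).toNat
decreasing_by
  · have h1 : lo ≤ PySem.Int.floordiv (lo + hi) 2 :=
      (PySem.Int.floordiv_two_mid_bounds (le_of_lt h)).1
    omega
  · have h2 : PySem.Int.floordiv (lo + hi) 2 < hi :=
      (PySem.Int.floordiv_lt_iff_lt_mul (by omega)).mpr (by omega)
    omega

-- zip(*grid, strict=True): exact where Python returns (all rows the same length, incl. the
-- empty grid); on ragged grids Python raises ValueError (those inputs are outside B's domain)
def zipStrictCols (grid : List (List Int)) : List (List Int) :=
  match grid with
  | [] => []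
  | r0 :: _ => (List.range r0.length).map (fun j => grid.map (fun row => row.getD j 0))

def solve_alt (grid : List (List Int)) : Int :=
  let colmax := PySem.List.sorted ((zipStrictCols grid).map (fun col =>
    (PySem.List.max? col (fun x => x)).getD 0)) (fun x => x) false
  grid.foldl (fun total row =>
    let r := (PySem.List.max? row (fun x => x)).getD 0
    let lo := bisearch colmax r 0 (colmax.length : Int)
    total + ((PySem.List.slice colmax (some 0) (some lo)).sum
              + r * ((colmax.length : Int) - lo) - row.sum)) 0

-- ===== PRECONDITION & SPEC =====
-- Pre_: A indexes grid[j][i] through its own transpose and grid[i][j] for i < len(grid[0]),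
-- j < len(grid); it returns normally exactly on nonempty square grids (elsewhere it raises
-- IndexError, or ValueError on max of an empty row).
def Pre_solve (grid : List (List Int)) : Prop :=
  grid ≠ [] ∧ ∀ row ∈ grid, row.length = grid.length
instance (grid : List (List Int)) : Decidable (Pre_solve grid) := by unfold Pre_solve; infer_instance
def pvWitness_solve : List (List Int) := [[1, 2], [3, 4]]
def Spec_solve (grid : List (List Int)) (out : Int) : Prop := out = solve_alt grid
instance (grid : List (List Int)) (out : Int) : Decidable (Spec_solve grid out) := by unfold Spec_solve; infer_instance

-- ===== CLAIM (what is proved, stated in full; the proofs are below) =====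
def Claim_equal_solve : Prop := ∀ (grid : List (List Int)), Dom_solve grid → Pre_solve grid → Spec_solve grid (solve grid)

-- ===== LEMMAS AND PROOFS =====

-- column j of a square grid, and the two maxima
def colL (grid : List (List Int)) (j : Nat) : List Int := grid.map (fun row => row.getD j 0)
def cmax (grid : List (List Int)) (j : Nat) : Int := (PySem.List.max? (colL grid j) (fun x => x)).getD 0
def rmaxOf (row : List Int) : Int := (PySem.List.max? row (fun x => x)).getD 0

-- map over range of getD is map
theorem map_range_getD {α β : Type} (xs : List α) (d : α) (f : α → β) :
    (List.range xs.length).map (fun k => f (xs.getD k d)) = xs.map f := by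
  induction xs with
  | nil => simp
  | cons x t ih =>
    simp only [List.length_cons, List.range_succ_eq_map, List.map_cons, List.map_map]
    simp only [List.getD_cons_zero]
    refine congrArg (f x :: ·) ?_
    simpa [Function.comp] using ih

theorem sum_map_sub_int {α : Type} (l : List α) (f g : α → Int) :
    (l.map (fun x => f x - g x)).sum = (l.map f).sum - (l.map g).sum := by
  induction l with
  | nil => simp
  | cons x t ih => simp [ih]; ring

-- dict fold: lookups in a fold of fresh inserts
theorem getD_foldl_insert_notmem (l : List Int) (F : Int → Int) (d : PySem.Dict Int Int)
    (j : Int) (hj : j ∉ l) :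
    ((l.foldl (fun h i => h.insert i (F i)) d).getD j 0) = d.getD j 0 := by
  induction l generalizing d with
  | nil => rfl
  | cons a t ih =>
    simp only [List.foldl_cons]
    rw [ih _ (fun h => hj (List.mem_cons_of_mem _ h))]
    rw [PySem.Dict.getD_insert]
    simp only [List.mem_cons, not_or] at hj
    simp [hj.1]

theorem getD_foldl_insert_mem (l : List Int) (F : Int → Int) (d : PySem.Dict Int Int)
    (j : Int) (hnd : l.Nodup) (hj : j ∈ l) :
    ((l.foldl (fun h i => h.insert i (F i)) d).getD j 0) = F j := by
  induction l generalizing d with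
  | nil => cases hj
  | cons a t ih =>
    simp only [List.foldl_cons]
    rcases List.mem_cons.mp hj with h | h
    · subst h
      rw [getD_foldl_insert_notmem _ _ _ _ (List.nodup_cons.mp hnd).1]
      rw [PySem.Dict.getD_insert]; simp
    · exact ih _ (List.nodup_cons.mp hnd).2 h

theorem heights_getD (grid : List (List Int)) (hpre : Pre_solve grid)
    (j : Nat) (hj : j < grid.length) :
    (createTable grid).getD (j : Int) 0 = cmax grid j := by
  have key := getD_foldl_insert_mem (PySem.List.pyRange 0 (grid.length : Int) 1)
    (fun i => ((PySem.List.max? ((PySem.List.pyRange 0 ((PySem.List.pyGetD grid i []).length : Int) 1).foldl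
        (fun r t => r ++ [PySem.List.pyGetD (PySem.List.pyGetD grid t []) i 0]) []) (fun x => x)).getD 0))
    PySem.Dict.empty (j : Int) (PySem.List.nodup_pyRange_one 0 _)
    (PySem.List.mem_pyRange_one.mpr ⟨Int.natCast_nonneg j, by exact_mod_cast hj⟩)
  refine Eq.trans key ?_
  beta_reduce
  have hrow : PySem.List.pyGetD grid (j : Int) [] = grid.getD j [] := PySem.List.pyGetD_natCast _ _ _
  have hlen : (grid.getD j []).length = grid.length := by
    have : grid.getD j [] ∈ grid := by
      rw [List.getD_eq_getElem _ _ hj]; exact List.getElem_mem _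
    exact hpre.2 _ this
  rw [PySem.List.foldl_append_singleton_eq_map, hrow, hlen, PySem.List.pyRange_zero_nat,
      List.map_map, List.nil_append]
  have : (List.range grid.length).map ((fun t => PySem.List.pyGetD (PySem.List.pyGetD grid t []) (j:Int) 0) ∘ (fun k : Nat => (k : Int)))
       = (List.range grid.length).map (fun k => (grid.getD k []).getD j 0) := by
    apply List.map_congr_left
    intro k hk
    simp only [Function.comp]
    rw [PySem.List.pyGetD_natCast, PySem.List.pyGetD_natCast]
  rw [this, map_range_getD grid [] (fun row => row.getD j 0)]
  rfl

theorem rmax_mem_le (row : List Int) (hne : row ≠ []) (x : Int) (hx : x ∈ row) :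
    x ≤ rmaxOf row := by
  cases hm : PySem.List.max? row (fun x => x) with
  | none => exact absurd ((PySem.List.max?_eq_none_iff row (fun x => x)).mp hm) hne
  | some m =>
    have := PySem.List.max?_isMax hm x hx
    simpa [rmaxOf, hm] using this

theorem solve_eq (grid : List (List Int)) (hpre : Pre_solve grid) :
    solve grid =
      ((List.range grid.length).map (fun i =>
        ((List.range grid.length).map (fun j =>
          min (cmax grid j) (rmaxOf (grid.getD i [])) - (grid.getD i []).getD j 0)).sum)).sum := by
  have hne := hpre.1
  have hn : 0 < grid.length := List.length_pos_iff.mpr hne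
  unfold solve
  rw [PySem.List.pyGetD_of_nonneg grid [] le_rfl]
  have h0len : (grid.getD (0:Nat) []).length = grid.length := by
    have : grid.getD (0:Nat) [] ∈ grid := by
      rw [List.getD_eq_getElem _ _ hn]; exact List.getElem_mem _
    exact hpre.2 _ this
  simp only [Int.toNat_zero, h0len]
  rw [PySem.List.foldl_congr_mem _ _
    (fun tot i => tot +
      ((List.range grid.length).map (fun j =>
        min (cmax grid j) (rmaxOf (grid.getD i.toNat [])) - (grid.getD i.toNat []).getD j 0)).sum) 0 ?_]
  · rw [PySem.List.foldl_add, PySem.List.pyRange_zero_nat, List.map_map, zero_add]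
    refine congrArg List.sum (List.map_congr_left ?_)
    intro k hk
    simp
  · intro tot i hi
    obtain ⟨hi0, hin⟩ := PySem.List.mem_pyRange_one.mp hi
    have hiN : i.toNat < grid.length := by omega
    have hrowmem : grid.getD i.toNat [] ∈ grid := by
      rw [List.getD_eq_getElem _ _ hiN]; exact List.getElem_mem _
    have hrowlen : (grid.getD i.toNat []).length = grid.length := hpre.2 _ hrowmem
    beta_reduce
    rw [PySem.List.pyGetD_of_nonneg grid [] hi0]
    rw [PySem.List.foldl_congr_mem _ _
      (fun tot j => tot +
        (min (cmax grid j.toNat) (rmaxOf (grid.getD i.toNat [])) - (grid.getD i.toNat []).getD j.toNat 0)) tot ?_]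
    · rw [PySem.List.foldl_add, PySem.List.pyRange_zero_nat, List.map_map]
      refine congrArg (tot + ·) (congrArg List.sum (List.map_congr_left ?_))
      intro k hk
      simp
    · intro acc j hj
      obtain ⟨hj0, hjn⟩ := PySem.List.mem_pyRange_one.mp hj
      have hjN : j.toNat < grid.length := by omega
      beta_reduce
      rw [PySem.List.pyGetD_of_nonneg _ _ hj0]
      have hheights : (createTable grid).getD j 0 = cmax grid j.toNat := by
        rw [show j = ((j.toNat : Nat) : Int) from (Int.toNat_of_nonneg hj0).symm]
        exact heights_getD grid hpre j.toNat (by omega)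
      rw [hheights]
      have hcur_mem : (grid.getD i.toNat []).getD j.toNat 0 ∈ grid.getD i.toNat [] := by
        rw [List.getD_eq_getElem _ _ (by omega : j.toNat < (grid.getD i.toNat []).length)]
        exact List.getElem_mem _
      have hr : (grid.getD i.toNat []).getD j.toNat 0 ≤ rmaxOf (grid.getD i.toNat []) :=
        rmax_mem_le _ (by intro h; rw [h] at hrowlen; simp at hrowlen; omega) _ hcur_mem
      have hc : (grid.getD i.toNat []).getD j.toNat 0 ≤ cmax grid j.toNat := by
        have hmem : (grid.getD i.toNat []).getD j.toNat 0 ∈ colL grid j.toNat :=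
          List.mem_map_of_mem hrowmem
        have hcne : colL grid j.toNat ≠ [] := by
          simp only [colL, ne_eq, List.map_eq_nil_iff]; exact hne
        exact rmax_mem_le _ hcne _ hmem
      have hrm : (PySem.List.max? (grid.getD i.toNat []) (fun x => x)).getD 0 = rmaxOf (grid.getD i.toNat []) := rfl
      rw [hrm]
      set cur := (grid.getD i.toNat []).getD j.toNat 0 with hcur
      set cm := min (cmax grid j.toNat) (rmaxOf (grid.getD i.toNat [])) with hcm
      have hle : cur ≤ cm := le_min hc hr
      by_cases h : cur < cm
      · simp [h]
      · have : cm = cur := le_antisymm (not_lt.mp h) hle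
        simp [this]

-- ----- binary-search correctness -----

theorem countP_ge_of_le (cs : List Int) (hs : cs.Pairwise (· ≤ ·)) (r : Int)
    (m : Nat) (hm : m < cs.length) (h : cs[m] ≤ r) :
    m + 1 ≤ cs.countP (fun c => decide (c ≤ r)) := by
  have hall : ∀ a ∈ cs.take (m + 1), (fun c => decide (c ≤ r)) a = true := by
    intro a ha
    obtain ⟨i, hi, rfl⟩ := List.mem_iff_getElem.mp ha
    have hilen : i < cs.length := by
      have := List.length_take_le (m + 1) cs; omega
    rw [List.getElem_take]
    have him : i ≤ m := by
      have : (cs.take (m + 1)).length = m + 1 := by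
        rw [List.length_take]; omega
      omega
    rcases Nat.lt_or_ge i m with hlt | hge
    · have := (List.pairwise_iff_getElem.mp hs) i m hilen hm hlt
      simp only [decide_eq_true_eq]
      exact le_trans this h
    · have : i = m := by omega
      subst this
      simp only [decide_eq_true_eq]; exact h
  have h1 : (cs.take (m + 1)).countP (fun c => decide (c ≤ r)) = m + 1 := by
    rw [List.countP_eq_length.mpr hall, List.length_take]; omega
  calc m + 1 = (cs.take (m + 1)).countP (fun c => decide (c ≤ r)) := h1.symm
    _ ≤ cs.countP (fun c => decide (c ≤ r)) := by
        conv_rhs => rw [← List.take_append_drop (m + 1) cs]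
        rw [List.countP_append]; omega

theorem countP_le_of_gt (cs : List Int) (hs : cs.Pairwise (· ≤ ·)) (r : Int)
    (m : Nat) (hm : m < cs.length) (h : r < cs[m]) :
    cs.countP (fun c => decide (c ≤ r)) ≤ m := by
  have hnone : ∀ a ∈ cs.drop m, ¬ ((fun c => decide (c ≤ r)) a = true) := by
    intro a ha
    obtain ⟨i, hi, rfl⟩ := List.mem_iff_getElem.mp ha
    rw [List.getElem_drop]
    have hilen : m + i < cs.length := by
      have hl : (cs.drop m).length = cs.length - m := List.length_drop; omega
    simp only [decide_eq_true_eq, not_le]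
    rcases Nat.eq_zero_or_pos i with h0 | hp
    · subst h0; simpa using h
    · have := (List.pairwise_iff_getElem.mp hs) m (m + i) hm hilen (by omega)
      exact lt_of_lt_of_le h this
  have h0 : (cs.drop m).countP (fun c => decide (c ≤ r)) = 0 :=
    List.countP_eq_zero.mpr hnone
  conv_lhs => rw [← List.take_append_drop m cs]
  rw [List.countP_append, h0]
  have := List.countP_le_length (l := cs.take m) (p := fun c => decide (c ≤ r))
  have := List.length_take_le m cs
  omega

theorem bisearch_eq_countP_aux (cs : List Int) (hs : cs.Pairwise (· ≤ ·)) (r : Int) :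
    ∀ (fuel : Nat) (lo hi : Int), (hi - lo).toNat ≤ fuel → 0 ≤ lo → hi ≤ (cs.length : Int) →
      lo ≤ (cs.countP (fun c => decide (c ≤ r)) : Int) →
      (cs.countP (fun c => decide (c ≤ r)) : Int) ≤ hi →
      bisearch cs r lo hi = (cs.countP (fun c => decide (c ≤ r)) : Int) := by
  intro fuel
  induction fuel with
  | zero =>
    intro lo hi hf h0 hlen hk1 hk2
    rw [bisearch]
    have : ¬ lo < hi := by omega
    simp only [this, dite_false]
    omega
  | succ n ih =>
    intro lo hi hf h0 hlen hk1 hk2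
    rw [bisearch]
    by_cases h : lo < hi
    · simp only [h, dite_true]
      have hmid1 : lo ≤ PySem.Int.floordiv (lo + hi) 2 :=
        (PySem.Int.floordiv_two_mid_bounds (le_of_lt h)).1
      have hmid2 : PySem.Int.floordiv (lo + hi) 2 < hi :=
        (PySem.Int.floordiv_lt_iff_lt_mul (by omega)).mpr (by omega)
      set mid := PySem.Int.floordiv (lo + hi) 2 with hmiddef
      have hmidlen : mid < (cs.length : Int) := by omega
      have hmid0 : 0 ≤ mid := by omega
      have hget : PySem.List.pyGetD cs mid 0 = cs[mid.toNat] :=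
        PySem.List.pyGetD_eq_getElem cs 0 hmid0 (by
          simpa [PySem.List.len_eq] using hmidlen)
      rw [hget]
      have hmN : mid.toNat < cs.length := by omega
      by_cases hc : cs[mid.toNat] ≤ r
      · simp only [hc, if_true]
        have hk : mid.toNat + 1 ≤ cs.countP (fun c => decide (c ≤ r)) :=
          countP_ge_of_le cs hs r mid.toNat hmN hc
        exact ih (mid + 1) hi (by omega) (by omega) hlen (by omega) hk2
      · simp only [hc, if_false]
        have hk : cs.countP (fun c => decide (c ≤ r)) ≤ mid.toNat :=
          countP_le_of_gt cs hs r mid.toNat hmN (by omega)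
        exact ih lo mid (by omega) h0 (by omega) hk1 (by omega)
    · simp only [h, dite_false]
      omega

theorem bisearch_eq_countP (cs : List Int) (hs : cs.Pairwise (· ≤ ·)) (r : Int) :
    bisearch cs r 0 (cs.length : Int) = (cs.countP (fun c => decide (c ≤ r)) : Int) := by
  have hk := List.countP_le_length (l := cs) (p := fun c => decide (c ≤ r))
  exact bisearch_eq_countP_aux cs hs r ((cs.length : Int) - 0).toNat 0 (cs.length : Int)
    le_rfl le_rfl le_rfl (Int.natCast_nonneg _) (by exact_mod_cast hk)

-- the prefix-plus-tail value the binary search computes is the sum of capped minima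
theorem take_sum_add_mul_eq (cs : List Int) (hs : cs.Pairwise (· ≤ ·)) (r : Int) :
    (cs.take (cs.countP (fun c => decide (c ≤ r)))).sum
      + r * ((cs.length : Int) - (cs.countP (fun c => decide (c ≤ r)) : Int))
      = (cs.map (fun c => min c r)).sum := by
  set k := cs.countP (fun c => decide (c ≤ r)) with hkdef
  have hklen : k ≤ cs.length := List.countP_le_length
  have htake : ∀ a ∈ cs.take k, a ≤ r := by
    intro a ha
    obtain ⟨i, hi, rfl⟩ := List.mem_iff_getElem.mp ha
    have hik : i < k := by
      have := List.length_take_le k cs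
      have : (cs.take k).length = k := by rw [List.length_take]; omega
      omega
    have hilen : i < cs.length := by omega
    rw [List.getElem_take]
    by_contra hgt
    have := countP_le_of_gt cs hs r i hilen (by omega)
    omega
  have hdrop : ∀ a ∈ cs.drop k, r < a := by
    intro a ha
    obtain ⟨i, hi, rfl⟩ := List.mem_iff_getElem.mp ha
    rw [List.getElem_drop]
    have hilen : k + i < cs.length := by
      have hl : (cs.drop k).length = cs.length - k := List.length_drop; omega
    by_contra hle
    have := countP_ge_of_le cs hs r (k + i) hilen (by omega)
    omega
  conv_rhs => rw [← List.take_append_drop k cs, List.map_append, List.sum_append]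
  have h1 : (cs.take k).map (fun c => min c r) = (cs.take k).map (fun c => c) := by
    apply List.map_congr_left
    intro a ha
    exact min_eq_left (htake a ha)
  have h2 : (cs.drop k).map (fun c => min c r) = (cs.drop k).map (fun _ => r) := by
    apply List.map_congr_left
    intro a ha
    exact min_eq_right (le_of_lt (hdrop a ha))
  rw [h1, h2, List.map_id']
  rw [PySem.List.sum_map_const_int]
  have hd : ((cs.drop k).length : Int) = (cs.length : Int) - (k : Int) := by
    rw [List.length_drop]; omega
  rw [hd]
  ring

-- the unsorted list of column maxima the B port builds
theorem colmax_list_eq (grid : List (List Int)) (hpre : Pre_solve grid) :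
    (zipStrictCols grid).map (fun col => (PySem.List.max? col (fun x => x)).getD 0)
      = (List.range grid.length).map (fun j => cmax grid j) := by
  obtain ⟨r0, rest, rfl⟩ := List.exists_cons_of_ne_nil hpre.1
  have h0len : r0.length = (r0 :: rest).length := hpre.2 r0 (List.mem_cons_self)
  show ((List.range r0.length).map (fun j => (r0 :: rest).map (fun row => row.getD j 0))).map _ = _
  rw [List.map_map, h0len]
  rfl

theorem solve_alt_eq (grid : List (List Int)) (hpre : Pre_solve grid) :
    solve_alt grid =
      (grid.map (fun row =>
        ((List.range grid.length).map (fun j => min (cmax grid j) (rmaxOf row))).sum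
          - row.sum)).sum := by
  have halt : solve_alt grid =
      grid.foldl (fun total row =>
        total + ((PySem.List.slice
            (PySem.List.sorted ((zipStrictCols grid).map (fun col =>
              (PySem.List.max? col (fun x => x)).getD 0)) (fun x => x) false)
            (some 0) (some (bisearch
              (PySem.List.sorted ((zipStrictCols grid).map (fun col =>
                (PySem.List.max? col (fun x => x)).getD 0)) (fun x => x) false)
              ((PySem.List.max? row (fun x => x)).getD 0) 0
              (((PySem.List.sorted ((zipStrictCols grid).map (fun col =>
                (PySem.List.max? col (fun x => x)).getD 0)) (fun x => x) false).length : Int))))).sum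
          + ((PySem.List.max? row (fun x => x)).getD 0)
            * (((PySem.List.sorted ((zipStrictCols grid).map (fun col =>
                (PySem.List.max? col (fun x => x)).getD 0)) (fun x => x) false).length : Int)
              - bisearch
                (PySem.List.sorted ((zipStrictCols grid).map (fun col =>
                  (PySem.List.max? col (fun x => x)).getD 0)) (fun x => x) false)
                ((PySem.List.max? row (fun x => x)).getD 0) 0
                (((PySem.List.sorted ((zipStrictCols grid).map (fun col =>
                  (PySem.List.max? col (fun x => x)).getD 0)) (fun x => x) false).length : Int)))
          - row.sum)) 0 := rfl
  rw [halt, colmax_list_eq grid hpre]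
  set colsU := (List.range grid.length).map (fun j => cmax grid j) with hcolsU
  set cs := PySem.List.sorted colsU (fun x => x) false with hcs
  have hperm : cs.Perm colsU := PySem.List.sorted_perm colsU (fun x => x) false
  have hsorted : cs.Pairwise (· ≤ ·) := by
    have := PySem.List.sorted_pairwise colsU (fun x => x)
    simpa [hcs] using this
  rw [PySem.List.foldl_add]
  rw [zero_add]
  apply congrArg List.sum
  apply List.map_congr_left
  intro row hrow
  beta_reduce
  have hrm : (PySem.List.max? row (fun x => x)).getD 0 = rmaxOf row := rfl
  rw [hrm]
  rw [bisearch_eq_countP cs hsorted (rmaxOf row)]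
  set k := cs.countP (fun c => decide (c ≤ rmaxOf row)) with hk
  have hklen : k ≤ cs.length := List.countP_le_length
  have hsl : PySem.List.slice cs (some 0) (some (k : Int)) = cs.take k := by
    rw [PySem.List.slice_zero_start, PySem.List.slice_to_natCast]
  rw [hsl]
  have hsum := take_sum_add_mul_eq cs hsorted (rmaxOf row)
  rw [← hk] at hsum
  rw [hsum]
  congr 1
  have hmapperm : (cs.map (fun c => min c (rmaxOf row))).Perm (colsU.map (fun c => min c (rmaxOf row))) :=
    hperm.map _
  rw [hmapperm.sum_eq, hcolsU, List.map_map]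
  rfl

-- ===== VERDICT (by name: the statement is the Claim_ definition above) =====
theorem solve_spec : Claim_equal_solve := by
  intro grid _ hpre
  unfold Spec_solve
  rw [solve_eq grid hpre, solve_alt_eq grid hpre]
  conv_lhs =>
    rw [List.map_congr_left (fun i (_ : i ∈ List.range grid.length) => sum_map_sub_int (List.range grid.length)
      (fun j => min (cmax grid j) (rmaxOf (grid.getD i [])))
      (fun j => (grid.getD i []).getD j 0))]
  rw [map_range_getD grid []
    (fun row => ((List.range grid.length).map (fun j => min (cmax grid j) (rmaxOf row))).sum
      - ((List.range grid.length).map (fun j => row.getD j 0)).sum)]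
  apply congrArg List.sum
  apply List.map_congr_left
  intro row hrow
  congr 1
  have hlen : row.length = grid.length := hpre.2 _ hrow
  rw [← hlen, map_range_getD row 0 (fun x => x), List.map_id']
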